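-- pv_equiv track=rewrite | github.com/nana1243/Algorithm | practice-test/2018kakaoblindetest-practice/자동완성-3.py | solution
-- ===== SOURCE A (Python) =====
-- def solution(words):
--     myDic = {}
--     words.sort() # 길이에 따른 sort
--     i = 0
--     while i < len(words):
--         if i==0:
--             myDic[words[i]] = words[i][0]
--         else :
--             insec = compareString(words[i-1], words[i])
--             if len(insec) == 0:
--                 myDic[words[i]] = words[i][0]
--             elif insec == words[i-1]:
--                 myDic[insec] = insec
--                 myDic[words[i]] = words[i][:len(insec)+1]
--             elif len(insec) >= len(myDic[words[i-1]]):
--                 myDic[words[i-1]] = words[i-1][:len(insec)+1]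
--                 myDic[words[i]] = words[i][:len(insec)+1]
--             else :
--                 myDic[words[i]] = words[i][:len(insec)+1]
--         i += 1
--     return sum([len(myDic.get(word)) for word in words])
--
-- def compareString(prev, curr):
--     i  = 0
--     while i < len(prev): # 이전의 글자의 길이가 길때까지 이과정을 반복하여러
--         if prev[i] != curr[i]:
--             break
--         i += 1
--     return prev[:i]
-- ===== SOURCE B (Python) =====
-- def solution(words):
--     # Count every non-empty prefix of every word (a flat trie with per-node
--     # counts, nodes keyed by the prefix string); then for each word type
--     # characters until its prefix is unique (count == 1) or the word ends.
--     # No sorting, no neighbour comparison.  Unlike A, does not mutate `words`.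
--     cnt = {}
--     for w in words:
--         for k in range(1, len(w) + 1):
--             p = w[:k]
--             cnt[p] = cnt.get(p, 0) + 1
--     total = 0
--     for w in words:
--         typed = len(w)
--         for k in range(1, len(w) + 1):
--             if cnt[w[:k]] == 1:
--                 typed = k
--                 break
--         total += typed
--     return total
-- ===== Notes on version B (the rewrite author's own statement) =====
-- stated objective: alternative
-- what changed: Replaces sort + adjacent-LCP dictionary bookkeeping (with retroactive updates of the previous word's entry) by a prefix-count table: count every non-empty prefix once, then each word types characters until its prefix count is 1.
import Mathlib
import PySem

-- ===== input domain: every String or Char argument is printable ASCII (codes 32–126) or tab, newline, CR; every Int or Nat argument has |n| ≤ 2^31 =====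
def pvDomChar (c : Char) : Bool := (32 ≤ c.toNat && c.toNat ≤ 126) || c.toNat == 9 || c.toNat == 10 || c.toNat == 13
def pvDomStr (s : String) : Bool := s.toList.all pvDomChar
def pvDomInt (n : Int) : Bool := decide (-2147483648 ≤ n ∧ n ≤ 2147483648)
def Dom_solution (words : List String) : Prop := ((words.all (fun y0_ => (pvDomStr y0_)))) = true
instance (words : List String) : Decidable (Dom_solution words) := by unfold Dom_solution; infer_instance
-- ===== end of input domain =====

-- B replaces A's sort + adjacent-LCP dictionary bookkeeping by a prefix-count table
-- (count every non-empty prefix, then type until the prefix count is 1): a different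
-- algorithm of similar cost ("alternative", no speed claim).  A sorts `words` in place
-- (observable by the caller); B does not mutate its argument — the equivalence proved
-- here is about the RETURN value only.

-- ===== PORT A =====
-- compareString(prev, curr): index loop; Python compares prev[i] != curr[i].
-- (Inside `solution` the list is sorted, so curr is never exhausted before a mismatch;
-- the Option comparison below breaks there, which is exact on the reachable inputs.)
def csLoop (prev curr : List Char) (i : Nat) : Nat → Nat
  | 0 => i
  | fuel + 1 =>
    if i < prev.length then
      (if prev[i]? ≠ curr[i]? then i else csLoop prev curr (i + 1) fuel)
    else i

def compareString (prev curr : List Char) : List Char :=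
  prev.take (csLoop prev curr 0 prev.length)   -- prev[:i]; fuel = |prev| bounds the while loop

-- one iteration of A's while-loop (dict keyed by the word; words[i] ported as getD i []).
-- words[i][0] (a 1-character string; IndexError on "" is excluded by Pre_) is w.take 1;
-- myDic[words[i-1]] is ported as getD (the key was inserted at step i-1, KeyError unreachable).
def aStep (ws : List (List Char)) (d : PySem.Dict (List Char) (List Char)) (i : Nat) :
    PySem.Dict (List Char) (List Char) :=
  let w := ws.getD i []
  if i = 0 then d.insert w (w.take 1)
  else
    let prev := ws.getD (i - 1) []
    let insec := compareString prev w
    if insec.length = 0 then d.insert w (w.take 1)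
    else if insec = prev then (d.insert insec insec).insert w (w.take (insec.length + 1))
    else if (d.getD prev []).length ≤ insec.length then
      (d.insert prev (prev.take (insec.length + 1))).insert w (w.take (insec.length + 1))
    else d.insert w (w.take (insec.length + 1))

def solution (words : List String) : Int :=
  -- words.sort() mutates; the final `for word in words` iterates the SORTED list
  -- Python sorts strings by code points = lexicographic order on their char lists:
  -- sorting with key toList is the same order (the key is injective)
  let ws := (PySem.List.sorted words (fun x => x.toList) false).map String.toList
  let d := (List.range ws.length).foldl (aStep ws) PySem.Dict.empty
  (ws.map (fun w => ((d.getD w []).length : Int))).sum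

-- ===== PORT B =====
-- count every non-empty prefix of every word (cnt[p] = cnt.get(p, 0) + 1)
def bCount (wls : List (List Char)) : PySem.Dict (List Char) Int :=
  wls.foldl (fun d w =>
    (List.range w.length).foldl (fun d k =>
      d.insert (w.take (k + 1)) (d.getD (w.take (k + 1)) 0 + 1)) d) PySem.Dict.empty

-- inner loop with break: first k with cnt[w[:k]] == 1, else len(w)
def bTyped (cnt : PySem.Dict (List Char) Int) (w : List Char) (k : Nat) : Nat → Nat
  | 0 => w.length
  | fuel + 1 =>
    if k < w.length then
      (if cnt.getD (w.take (k + 1)) 0 = 1 then k + 1 else bTyped cnt w (k + 1) fuel)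
    else w.length

def solution_alt (words : List String) : Int :=
  let wls := words.map String.toList
  let cnt := bCount wls
  wls.foldl (fun acc w => acc + (bTyped cnt w 0 w.length : Int)) 0

-- ===== PRECONDITION & SPEC =====
-- Pre_ excludes exactly the inputs containing the empty string "": there A raises
-- IndexError (words[i][0] on the empty word, which sorts first).
def Pre_solution (words : List String) : Prop := "" ∉ words
instance (words : List String) : Decidable (Pre_solution words) := by
  unfold Pre_solution; infer_instance

def pvWitness_solution : List String := ["go", "gone", "guild", "go"]

def Spec_solution (words : List String) (out : Int) : Prop := out = solution_alt words
instance (words : List String) (out : Int) : Decidable (Spec_solution words out) := by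
  unfold Spec_solution; infer_instance

-- ===== CLAIM (what is proved, stated in full; the proofs are below) =====
def Claim_equal_solution : Prop :=
  ∀ (words : List String), Dom_solution words → Pre_solution words →
    Spec_solution words (solution words)


-- ===== LEMMAS AND PROOFS =====

-- longest common prefix length
def lcp : List Char → List Char → Nat
  | a :: as, b :: bs => if a = b then lcp as bs + 1 else 0
  | _, _ => 0

-- greatest lcp of w with any member of l
def maxlcp (w : List Char) (l : List (List Char)) : Nat :=
  l.foldr (fun v m => max (lcp w v) m) 0

-- number of characters typed for one occurrence of w, given the other words
def typedSpec (w : List Char) (others : List (List Char)) : Nat :=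
  min w.length (maxlcp w others + 1)

def sumTyped (ws : List (List Char)) : Int :=
  (ws.map (fun w => (typedSpec w (ws.erase w) : Int))).sum

-- ---- lcp basics ----
lemma lcp_comm (a b : List Char) : lcp a b = lcp b a := by
  induction a generalizing b with
  | nil => cases b <;> simp [lcp]
  | cons x as ih =>
    cases b with
    | nil => simp [lcp]
    | cons y bs =>
      simp only [lcp]
      rcases eq_or_ne x y with h | h
      · simp [h, ih]
      · simp [h, Ne.symm h]

lemma lcp_le_left (a b : List Char) : lcp a b ≤ a.length := by
  induction a generalizing b with
  | nil => cases b <;> simp [lcp]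
  | cons x as ih =>
    cases b with
    | nil => simp [lcp]
    | cons y bs =>
      simp only [lcp]
      rcases eq_or_ne x y with h | h
      · simpa [h] using ih bs
      · simp [h]

lemma lcp_le_right (a b : List Char) : lcp a b ≤ b.length := by
  rw [lcp_comm]; exact lcp_le_left b a

lemma lcp_self (a : List Char) : lcp a a = a.length := by
  induction a with
  | nil => simp [lcp]
  | cons x as ih => simp [lcp, ih]

-- k ≤ lcp a b  ↔  a.take k is a prefix of b   (for k ≤ |a|)
lemma le_lcp_iff (a b : List Char) (k : Nat) (hk : k ≤ a.length) :
    k ≤ lcp a b ↔ a.take k <+: b := by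
  induction a generalizing b k with
  | nil =>
    have : k = 0 := by simpa using hk
    subst this
    simp [lcp]
  | cons x as ih =>
    cases k with
    | zero => simp [lcp]
    | succ k =>
      cases b with
      | nil => simp [lcp]
      | cons y bs =>
        simp only [lcp, List.take_succ_cons, List.cons_prefix_cons]
        rcases eq_or_ne x y with h | h
        · subst h
          simp only [if_true, Nat.succ_le_succ_iff, true_and]
          exact ih bs k (by simpa using hk)
        · simp [h]



lemma cons_le_iff (x y : Char) (a b : List Char) :
    x :: a ≤ y :: b ↔ x < y ∨ (x = y ∧ a ≤ b) := by
  rw [le_iff_lt_or_eq, le_iff_lt_or_eq, List.cons_lt_cons_iff, List.cons.injEq]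
  tauto

lemma le_nil_iff (a : List Char) : a ≤ [] ↔ a = [] := by
  rw [le_iff_lt_or_eq]
  simpa using fun h => absurd h (List.not_lt_nil a)

-- a ≤ b ≤ c (lexicographic) squeezes the common prefix of a and c into b
lemma lcp_between_left (a b c : List Char) (h1 : a ≤ b) (h2 : b ≤ c) :
    lcp a c ≤ lcp a b := by
  induction a generalizing b c with
  | nil => simp [lcp]
  | cons x as ih =>
    cases c with
    | nil => simp [lcp]
    | cons z cs =>
      rcases eq_or_ne x z with hxz | hxz
      · subst hxz
        cases b with
        | nil => exact absurd ((le_nil_iff _).mp h1) (by simp)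
        | cons y bs =>
          rcases (cons_le_iff _ _ _ _).mp h1 with h | ⟨hxy, hab⟩ <;>
            rcases (cons_le_iff _ _ _ _).mp h2 with h' | ⟨hyz, hbc⟩
          · exact absurd (h.trans h') (lt_irrefl _)
          · exact absurd (hyz ▸ h) (lt_irrefl _)
          · exact absurd (hxy ▸ h') (lt_irrefl _)
          · subst hxy
            simpa [lcp] using ih bs cs hab hbc
      · simp [lcp, hxz]

lemma lcp_between_right (a b c : List Char) (h1 : a ≤ b) (h2 : b ≤ c) :
    lcp a c ≤ lcp b c := by
  induction b generalizing a c with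
  | nil =>
    have := (le_nil_iff _).mp h1
    subst this
    simp [lcp]
  | cons y bs ih =>
    cases c with
    | nil => cases a <;> simp [lcp]
    | cons z cs =>
      cases a with
      | nil => simp [lcp]
      | cons x as =>
        rcases eq_or_ne x z with hxz | hxz
        · subst hxz
          rcases (cons_le_iff _ _ _ _).mp h1 with h | ⟨hxy, hab⟩ <;>
            rcases (cons_le_iff _ _ _ _).mp h2 with h' | ⟨hyz, hbc⟩
          · exact absurd (h.trans h') (lt_irrefl _)
          · exact absurd (hyz ▸ h) (lt_irrefl _)
          · exact absurd (hxy ▸ h') (lt_irrefl _)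
          · subst hxy
            simpa [lcp] using ih as cs hab hbc
        · simp [lcp, hxz]


-- ---- maxlcp ----
lemma maxlcp_le_iff (w : List Char) (l : List (List Char)) (k : Nat) :
    maxlcp w l ≤ k ↔ ∀ v ∈ l, lcp w v ≤ k := by
  induction l with
  | nil => simp [maxlcp]
  | cons v t ih => simp [maxlcp, ih, maxlcp] at ih ⊢; tauto

lemma le_maxlcp_of_mem (w v : List Char) (l : List (List Char)) (hv : v ∈ l) :
    lcp w v ≤ maxlcp w l := by
  induction l with
  | nil => cases hv
  | cons u t ih =>
    rcases List.mem_cons.mp hv with rfl | hv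
    · simp [maxlcp]
    · exact le_trans (ih hv) (by simp [maxlcp])

lemma maxlcp_perm (w : List Char) (l l' : List (List Char)) (h : l.Perm l') :
    maxlcp w l = maxlcp w l' := by
  refine le_antisymm ?_ ?_
  · exact (maxlcp_le_iff _ _ _).mpr fun v hv => le_maxlcp_of_mem w v l' (h.mem_iff.mp hv)
  · exact (maxlcp_le_iff _ _ _).mpr fun v hv => le_maxlcp_of_mem w v l (h.mem_iff.mpr hv)

lemma sumTyped_perm (ws ws' : List (List Char)) (h : ws.Perm ws') :
    sumTyped ws = sumTyped ws' := by
  unfold sumTyped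
  have hpt : ∀ w : List Char,
      typedSpec w (ws.erase w) = typedSpec w (ws'.erase w) := by
    intro w
    unfold typedSpec
    rw [maxlcp_perm w _ _ (h.erase w)]
  calc (ws.map (fun w => (typedSpec w (ws.erase w) : Int))).sum
      = (ws.map (fun w => (typedSpec w (ws'.erase w) : Int))).sum := by
        simp only [hpt]
    _ = (ws'.map (fun w => (typedSpec w (ws'.erase w) : Int))).sum :=
        (h.map _).sum_eq

-- ---- B side ----
lemma bCount_inner (w : List Char) (d : PySem.Dict (List Char) Int) (p : List Char)
    (n : Nat) (hn : n ≤ w.length) :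
    ((List.range n).foldl (fun d k =>
        d.insert (w.take (k + 1)) (d.getD (w.take (k + 1)) 0 + 1)) d).getD p 0
      = d.getD p 0 + (if p ≠ [] ∧ p <+: w ∧ p.length ≤ n then 1 else 0) := by
  induction n generalizing d with
  | zero =>
    have : ¬(p ≠ [] ∧ p <+: w ∧ p.length ≤ 0) := by
      rintro ⟨h1, -, h3⟩
      exact h1 (List.eq_nil_of_length_eq_zero (by omega))
    simp only [List.range_zero, List.foldl_nil, if_neg this, add_zero]
  | succ n ih =>
    rw [List.range_succ, List.foldl_append, List.foldl_cons, List.foldl_nil]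
    have hlen : (w.take (n + 1)).length = n + 1 := by
      rw [List.length_take]; omega
    rcases eq_or_ne p (w.take (n + 1)) with rfl | hne
    · rw [PySem.Dict.getD_insert_self, ih d (by omega)]
      have hc1 : ¬(w.take (n + 1) ≠ [] ∧ w.take (n + 1) <+: w ∧ (w.take (n + 1)).length ≤ n) := by
        rintro ⟨-, -, h⟩; omega
      have hc2 : w.take (n + 1) ≠ [] ∧ w.take (n + 1) <+: w ∧ (w.take (n + 1)).length ≤ n + 1 := by
        refine ⟨?_, List.take_prefix _ _, by omega⟩
        intro h; rw [h] at hlen; simp at hlen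
      rw [if_neg hc1, if_pos hc2]; ring
    · rw [PySem.Dict.getD_insert_of_ne, ih d (by omega)]
      · congr 1
        by_cases hp : p ≠ [] ∧ p <+: w
        · rcases hp with ⟨hp1, hp2⟩
          have hiff : p.length ≤ n ↔ p.length ≤ n + 1 := by
            constructor
            · omega
            · intro h
              rcases Nat.lt_or_ge p.length (n + 1) with h' | h'
              · omega
              · exfalso; apply hne
                have hpl : p.length = n + 1 := by omega
                calc p = w.take p.length := List.prefix_iff_eq_take.mp hp2
                  _ = w.take (n + 1) := by rw [hpl]
          simp [hp1, hp2, hiff]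
        · have h1 : ¬(p ≠ [] ∧ p <+: w ∧ p.length ≤ n) := by tauto
          have h2 : ¬(p ≠ [] ∧ p <+: w ∧ p.length ≤ n + 1) := by tauto
          rw [if_neg h1, if_neg h2]
      · exact hne

lemma bCount_getD (wls : List (List Char)) (d : PySem.Dict (List Char) Int) (p : List Char) :
    (wls.foldl (fun d w => (List.range w.length).foldl (fun d k =>
        d.insert (w.take (k + 1)) (d.getD (w.take (k + 1)) 0 + 1)) d) d).getD p 0
      = d.getD p 0 + (if p = [] then 0 else (wls.countP (fun w => decide (p <+: w)) : Int)) := by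
  induction wls generalizing d with
  | nil => simp
  | cons w t ih =>
    rw [List.foldl_cons, ih _, bCount_inner w d p w.length le_rfl, List.countP_cons]
    rcases eq_or_ne p [] with rfl | hp
    · simp
    · have hcond : (p ≠ [] ∧ p <+: w ∧ p.length ≤ w.length) ↔ p <+: w := by
        constructor
        · rintro ⟨-, h, -⟩; exact h
        · intro h; exact ⟨hp, h, h.length_le⟩
      by_cases hw : p <+: w
      · rw [if_pos (show p ≠ [] ∧ p <+: w ∧ p.length ≤ w.length from ⟨hp, hw, hw.length_le⟩),
          if_neg hp, if_neg hp]
        simp only [hw, decide_true, if_true]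
        push_cast; ring
      · rw [if_neg (show ¬(p ≠ [] ∧ p <+: w ∧ p.length ≤ w.length) from fun hc => hw hc.2.1),
          if_neg hp, if_neg hp]
        simp only [hw, decide_false, if_false]
        push_cast; ring

lemma bCount_one_iff (wls : List (List Char)) (w : List Char) (hw : w ∈ wls)
    (k : Nat) (hk : k < w.length) :
    ((bCount wls).getD (w.take (k + 1)) 0 = 1) ↔ maxlcp w (wls.erase w) ≤ k := by
  unfold bCount
  rw [bCount_getD, PySem.Dict.getD_empty]
  have hne : w.take (k + 1) ≠ [] := by
    have hlen : (w.take (k + 1)).length = k + 1 := by rw [List.length_take]; omega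
    intro h; rw [h] at hlen; simp at hlen
  rw [if_neg hne, zero_add]
  have hperm : wls.Perm (w :: wls.erase w) := List.perm_cons_erase hw
  rw [hperm.countP_eq]
  have hpw : w.take (k + 1) <+: w := List.take_prefix _ _
  rw [List.countP_cons, if_pos (by simpa using hpw)]
  constructor
  · intro h
    have hz : (wls.erase w).countP (fun v => decide (w.take (k + 1) <+: v)) = 0 := by
      have := h
      push_cast at this
      omega
    rw [List.countP_eq_zero] at hz
    refine (maxlcp_le_iff _ _ _).mpr fun v hv => ?_
    have := hz v hv
    have hnp : ¬(w.take (k + 1) <+: v) := by simpa using this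
    have := (le_lcp_iff w v (k + 1) (by omega)).not.mpr hnp
    omega
  · intro h
    have hz : (wls.erase w).countP (fun v => decide (w.take (k + 1) <+: v)) = 0 := by
      rw [List.countP_eq_zero]
      intro v hv
      have hlv : lcp w v ≤ k := (maxlcp_le_iff _ _ _).mp h v hv
      have : ¬(k + 1 ≤ lcp w v) := by omega
      have := (le_lcp_iff w v (k + 1) (by omega)).not.mp this
      simpa using this
    rw [hz]
    norm_num

lemma bTyped_spec (cnt : PySem.Dict (List Char) Int) (w : List Char) (M : Nat)
    (hc : ∀ k, k < w.length → ((cnt.getD (w.take (k + 1)) 0 = 1) ↔ M ≤ k)) :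
    ∀ fuel k, w.length ≤ k + fuel → k ≤ M → bTyped cnt w k fuel = min w.length (M + 1) := by
  intro fuel
  induction fuel with
  | zero =>
    intro k h1 h2
    simp only [bTyped]
    omega
  | succ fuel ih =>
    intro k h1 h2
    simp only [bTyped]
    by_cases hk : k < w.length
    · rw [if_pos hk]
      by_cases hone : cnt.getD (w.take (k + 1)) 0 = 1
      · have : M ≤ k := (hc k hk).mp hone
        rw [if_pos hone]
        omega
      · have : ¬(M ≤ k) := fun h => hone ((hc k hk).mpr h)
        rw [if_neg hone]
        exact ih (k + 1) (by omega) (by omega)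
    · rw [if_neg hk]
      omega

lemma solution_alt_eq (words : List String) :
    solution_alt words = sumTyped (words.map String.toList) := by
  unfold solution_alt sumTyped
  rw [PySem.List.foldl_add]
  rw [zero_add]
  congr 1
  apply List.map_congr_left
  intro w hw
  congr 1
  have hM := bTyped_spec (bCount (words.map String.toList)) w
    (maxlcp w ((words.map String.toList).erase w))
    (fun k hk => bCount_one_iff (words.map String.toList) w hw k hk)
    w.length 0 (by omega) (by omega)
  rw [hM]
  rfl

-- ---- A side: compareString computes the longest common prefix ----
lemma lcp_getElem_eq (a b : List Char) (i : Nat) (hi : i < lcp a b) : a[i]? = b[i]? := by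
  induction a generalizing b i with
  | nil => simp [lcp] at hi
  | cons x as ih =>
    cases b with
    | nil => simp [lcp] at hi
    | cons y bs =>
      rcases eq_or_ne x y with rfl | hxy
      · cases i with
        | zero => rfl
        | succ i =>
          simp only [List.getElem?_cons_succ]
          exact ih bs i (by simpa [lcp] using hi)
      · simp [lcp, hxy] at hi

lemma lcp_getElem_ne (a b : List Char) (h : lcp a b < a.length) :
    a[lcp a b]? ≠ b[lcp a b]? := by
  induction a generalizing b with
  | nil => simp [lcp] at h
  | cons x as ih =>
    cases b with
    | nil => simp [lcp]
    | cons y bs =>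
      rcases eq_or_ne x y with rfl | hxy
      · have hl : lcp (x :: as) (x :: bs) = lcp as bs + 1 := by simp [lcp]
        rw [hl]
        simp only [List.getElem?_cons_succ]
        exact ih bs (by simpa [lcp] using h)
      · have hl : lcp (x :: as) (y :: bs) = 0 := by simp [lcp, hxy]
        rw [hl]
        simpa using hxy

lemma csLoop_spec (a b : List Char) :
    ∀ fuel i, a.length ≤ i + fuel → i ≤ lcp a b → csLoop a b i fuel = lcp a b := by
  intro fuel
  induction fuel with
  | zero =>
    intro i h1 h2
    have := lcp_le_left a b
    have : i = lcp a b := by omega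
    simpa [csLoop] using this
  | succ fuel ih =>
    intro i h1 h2
    simp only [csLoop]
    by_cases hi : i < a.length
    · rw [if_pos hi]
      rcases eq_or_lt_of_le h2 with rfl | hlt
      · rw [if_pos (lcp_getElem_ne a b hi)]
      · rw [if_neg (by simpa using lcp_getElem_eq a b i hlt)]
        exact ih (i + 1) (by omega) (by omega)
    · rw [if_neg hi]
      have := lcp_le_left a b
      omega

lemma compareString_eq (a b : List Char) : compareString a b = a.take (lcp a b) := by
  unfold compareString
  rw [csLoop_spec a b a.length 0 (by omega) (by omega)]

-- ---- A side: the sorted list, index view ----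
def wA (ws : List (List Char)) (j : Nat) : List Char := ws.getD j []

def Lf (ws : List (List Char)) (j : Nat) : Nat :=
  if j = 0 then 0 else lcp (wA ws (j - 1)) (wA ws j)

-- the dictionary value held for index j after the first i loop iterations
def capV (ws : List (List Char)) (i j : Nat) : List Char :=
  (wA ws j).take (1 + max (Lf ws j) (if j + 1 < i then Lf ws (j + 1) else 0))

lemma wA_le (ws : List (List Char)) (hs : ws.Pairwise (· ≤ ·)) (i j : Nat)
    (hij : i ≤ j) (hj : j < ws.length) : wA ws i ≤ wA ws j := by
  rcases eq_or_lt_of_le hij with rfl | hlt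
  · exact le_refl _
  · unfold wA
    rw [List.getD_eq_getElem ws [] (by omega), List.getD_eq_getElem ws [] hj]
    exact List.pairwise_iff_getElem.mp hs i j (by omega) hj hlt

lemma wA_sandwich (ws : List (List Char)) (hs : ws.Pairwise (· ≤ ·)) (i k j : Nat)
    (h1 : i ≤ k) (h2 : k ≤ j) (hj : j < ws.length) (he : wA ws i = wA ws j) :
    wA ws k = wA ws i := by
  have a1 := wA_le ws hs i k h1 (by omega)
  have a2 := wA_le ws hs k j h2 hj
  rw [he] at a1 ⊢
  exact le_antisymm a2 a1

-- duplicates force a full-length neighbour lcp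
lemma Lf_succ_of_dup (ws : List (List Char)) (hs : ws.Pairwise (· ≤ ·)) (j k : Nat)
    (hjk : j < k) (hk : k < ws.length) (he : wA ws j = wA ws k) :
    Lf ws (j + 1) = (wA ws j).length := by
  have h1 : wA ws (j + 1) = wA ws j :=
    wA_sandwich ws hs j (j + 1) k (by omega) (by omega) hk he
  unfold Lf
  rw [if_neg (by omega)]
  simp only [Nat.add_sub_cancel]
  rw [h1, lcp_self]

lemma maxlcp_neighbors (ws : List (List Char)) (hs : ws.Pairwise (· ≤ ·)) (j : Nat)
    (hj : j < ws.length) :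
    maxlcp (wA ws j) (ws.erase (wA ws j))
      = max (Lf ws j) (if j + 1 < ws.length then Lf ws (j + 1) else 0) := by
  have hwj : wA ws j = ws[j] := List.getD_eq_getElem ws [] hj
  have hmem : wA ws j ∈ ws := by rw [hwj]; exact List.getElem_mem hj
  -- erase (one occurrence of the value) is a permutation of eraseIdx j
  have hperm : (ws.erase (wA ws j)).Perm (ws.eraseIdx j) := by
    have p1 : ws.Perm (wA ws j :: ws.erase (wA ws j)) := List.perm_cons_erase hmem
    have p2 : ws.Perm (wA ws j :: ws.eraseIdx j) := by
      conv_lhs => rw [← List.take_append_drop j ws, ← List.getElem_cons_drop hj]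
      rw [List.eraseIdx_eq_take_drop_succ, hwj]
      exact List.perm_middle
    exact (p1.symm.trans p2).cons_inv
  rw [maxlcp_perm _ _ _ hperm]
  have hlen : (ws.eraseIdx j).length = ws.length - 1 := by
    rw [List.length_eraseIdx_of_lt hj]
  apply le_antisymm
  · rw [maxlcp_le_iff]
    intro v hv
    obtain ⟨m, hm, rfl⟩ := List.getElem_of_mem hv
    rcases Nat.lt_or_ge m j with hmj | hmj
    · -- v = ws[m], m < j : lcp ≤ Lf j
      have hv' : (ws.eraseIdx j)[m] = ws[m] := by
        have := List.getElem?_eraseIdx_of_lt (l := ws) (i := j) (j := m) hmj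
        rw [List.getElem?_eq_getElem hm, List.getElem?_eq_getElem (by omega)] at this
        exact Option.some.inj this
      rw [hv']
      have hle : lcp ws[m] (wA ws j) ≤ Lf ws j := by
        unfold Lf
        rw [if_neg (by omega)]
        have h1 : wA ws m ≤ wA ws (j - 1) := wA_le ws hs m (j - 1) (by omega) (by omega)
        have h2 : wA ws (j - 1) ≤ wA ws j := wA_le ws hs (j - 1) j (by omega) hj
        have := lcp_between_right (wA ws m) (wA ws (j - 1)) (wA ws j) h1 h2
        have hwm : wA ws m = ws[m] := List.getD_eq_getElem ws [] (by omega)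
        rw [hwm] at this
        exact this
      calc lcp (wA ws j) ws[m] = lcp ws[m] (wA ws j) := lcp_comm _ _
        _ ≤ _ := le_trans hle (le_max_left _ _)
    · -- v = ws[m+1], m ≥ j : lcp ≤ Lf (j+1)
      have hv' : (ws.eraseIdx j)[m] = ws[m + 1] := by
        have := List.getElem?_eraseIdx_of_ge (l := ws) (i := j) (j := m) hmj
        rw [List.getElem?_eq_getElem hm, List.getElem?_eq_getElem (by omega)] at this
        exact Option.some.inj this
      rw [hv']
      have hj1 : j + 1 < ws.length := by omega
      have h1 : wA ws j ≤ wA ws (j + 1) := wA_le ws hs j (j + 1) (by omega) hj1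
      have h2 : wA ws (j + 1) ≤ wA ws (m + 1) := wA_le ws hs (j + 1) (m + 1) (by omega) (by omega)
      have := lcp_between_left (wA ws j) (wA ws (j + 1)) (wA ws (m + 1)) h1 h2
      have hwm : wA ws (m + 1) = ws[m + 1] := List.getD_eq_getElem ws [] (by omega)
      rw [hwm] at this
      refine le_trans this (le_trans ?_ (le_max_right _ _))
      rw [if_pos hj1]
      unfold Lf
      rw [if_neg (by omega)]
      simp only [Nat.add_sub_cancel]
      exact le_refl _
  · apply max_le
    · -- Lf j is attained at index j-1
      unfold Lf
      by_cases h0 : j = 0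
      · simp [h0]
      · rw [if_neg h0]
        have hmem' : wA ws (j - 1) ∈ ws.eraseIdx j := by
          have hv' : (ws.eraseIdx j)[j - 1]'(by omega) = ws[j - 1] := by
            have := List.getElem?_eraseIdx_of_lt (l := ws) (i := j) (j := j - 1) (by omega)
            rw [List.getElem?_eq_getElem (by omega), List.getElem?_eq_getElem (by omega)] at this
            exact Option.some.inj this
          have : wA ws (j - 1) = (ws.eraseIdx j)[j - 1]'(by omega) := by
            rw [hv']
            exact List.getD_eq_getElem ws [] (by omega)
          rw [this]
          exact List.getElem_mem _
        have := le_maxlcp_of_mem (wA ws j) (wA ws (j - 1)) (ws.eraseIdx j) hmem'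
        rwa [lcp_comm] at this
    · by_cases hj1 : j + 1 < ws.length
      · rw [if_pos hj1]
        unfold Lf
        rw [if_neg (by omega)]
        simp only [Nat.add_sub_cancel]
        have hmem' : wA ws (j + 1) ∈ ws.eraseIdx j := by
          have hv' : (ws.eraseIdx j)[j]'(by omega) = ws[j + 1] := by
            have := List.getElem?_eraseIdx_of_ge (l := ws) (i := j) (j := j) (by omega)
            rw [List.getElem?_eq_getElem (by omega), List.getElem?_eq_getElem (by omega)] at this
            exact Option.some.inj this
          have : wA ws (j + 1) = (ws.eraseIdx j)[j]'(by omega) := by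
            rw [hv']
            exact List.getD_eq_getElem ws [] (by omega)
          rw [this]
          exact List.getElem_mem _
        exact le_maxlcp_of_mem (wA ws j) (wA ws (j + 1)) (ws.eraseIdx j) hmem'
      · rw [if_neg hj1]
        exact Nat.zero_le _

lemma capV_stable (ws : List (List Char)) (i j : Nat) (h : j + 1 < i) :
    capV ws (i + 1) j = capV ws i j := by
  unfold capV
  rw [if_pos h, if_pos (by omega)]

lemma capV_top (ws : List (List Char)) (i : Nat) :
    capV ws (i + 1) i = (wA ws i).take (1 + Lf ws i) := by
  unfold capV
  rw [if_neg (by omega), Nat.max_zero]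

lemma capV_snd (ws : List (List Char)) (i : Nat) (hi : i ≠ 0) :
    capV ws (i + 1) (i - 1) =
      (wA ws (i - 1)).take (1 + max (Lf ws (i - 1)) (Lf ws i)) := by
  unfold capV
  rw [if_pos (by omega), Nat.sub_add_cancel (by omega)]

lemma capV_prev (ws : List (List Char)) (i : Nat) (hi : i ≠ 0) :
    capV ws i (i - 1) = (wA ws (i - 1)).take (1 + Lf ws (i - 1)) := by
  unfold capV
  rw [if_neg (by omega), Nat.max_zero]

-- one loop iteration, with compareString evaluated to the lcp (i ≥ 1)
lemma aStep_eq (ws : List (List Char)) (d : PySem.Dict (List Char) (List Char))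
    (i : Nat) (hi0 : i ≠ 0) :
    aStep ws d i =
      (if lcp (wA ws (i - 1)) (wA ws i) = 0 then
        d.insert (wA ws i) ((wA ws i).take 1)
      else if (wA ws (i - 1)).take (lcp (wA ws (i - 1)) (wA ws i)) = wA ws (i - 1) then
        (d.insert ((wA ws (i - 1)).take (lcp (wA ws (i - 1)) (wA ws i)))
            ((wA ws (i - 1)).take (lcp (wA ws (i - 1)) (wA ws i)))).insert (wA ws i)
          ((wA ws i).take (lcp (wA ws (i - 1)) (wA ws i) + 1))
      else if (d.getD (wA ws (i - 1)) []).length ≤ lcp (wA ws (i - 1)) (wA ws i) then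
        (d.insert (wA ws (i - 1))
            ((wA ws (i - 1)).take (lcp (wA ws (i - 1)) (wA ws i) + 1))).insert (wA ws i)
          ((wA ws i).take (lcp (wA ws (i - 1)) (wA ws i) + 1))
      else d.insert (wA ws i) ((wA ws i).take (lcp (wA ws (i - 1)) (wA ws i) + 1))) := by
  have hmin : ∀ a b : List Char, min (lcp a b) a.length = lcp a b :=
    fun a b => Nat.min_eq_left (lcp_le_left a b)
  unfold aStep wA
  rw [if_neg hi0]
  simp only [compareString_eq, List.length_take, hmin]

-- the dictionary invariant of A's while-loop
lemma aInv (ws : List (List Char)) (hs : ws.Pairwise (· ≤ ·)) (hne : ∀ w ∈ ws, w ≠ []) :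
    ∀ i, i ≤ ws.length → ∀ j, j < i →
      ((List.range i).foldl (aStep ws) PySem.Dict.empty).getD (wA ws j) [] = capV ws i j := by
  intro i
  induction i with
  | zero => intro _ j hj; omega
  | succ i ih =>
    intro hi j hj
    rw [List.range_succ, List.foldl_append, List.foldl_cons, List.foldl_nil]
    set d := (List.range i).foldl (aStep ws) PySem.Dict.empty with hd
    have hin : i < ws.length := by omega
    by_cases hi0 : i = 0
    · subst hi0
      have hj0 : j = 0 := by omega
      subst hj0
      unfold aStep wA
      rw [if_pos rfl, PySem.Dict.getD_insert_self]
      unfold capV Lf wA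
      simp
    · -- i ≥ 1
      have hWmem : wA ws i ∈ ws := by
        unfold wA; rw [List.getD_eq_getElem ws [] hin]; exact List.getElem_mem hin
      have hPmem : wA ws (i - 1) ∈ ws := by
        unfold wA; rw [List.getD_eq_getElem ws [] (by omega)]; exact List.getElem_mem (by omega)
      have hWne : wA ws i ≠ [] := hne _ hWmem
      have hPne : wA ws (i - 1) ≠ [] := hne _ hPmem
      have hd_prev : d.getD (wA ws (i - 1)) [] = capV ws i (i - 1) :=
        ih (by omega) (i - 1) (by omega)
      rw [aStep_eq ws d i hi0]
      set P := wA ws (i - 1) with hP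
      set W := wA ws i with hW
      set l := lcp P W with hl
      have hlP : l ≤ P.length := lcp_le_left P W
      have hlW : l ≤ W.length := lcp_le_right P W
      have hLfi : Lf ws i = l := by unfold Lf; rw [if_neg hi0, ← hP, ← hW, ← hl]
      have hWpos : 0 < W.length := by
        cases hww : W with
        | nil => exact absurd hww hWne
        | cons a t => simp [hww]
      have hPpos : 0 < P.length := by
        cases hpp : P with
        | nil => exact absurd hpp hPne
        | cons a t => simp [hpp]
      have hinsec_eq_iff : (P.take l = P) ↔ l = P.length := by
        constructor
        · intro h
          have := congrArg List.length h
          rw [List.length_take] at this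
          omega
        · intro h
          rw [h]
          exact List.take_of_length_le le_rfl
      have hdupW : ∀ j', j' < i → wA ws j' = W → capV ws (i + 1) j' = wA ws j' := by
        intro j' hj' he
        have hfull : Lf ws (j' + 1) = (wA ws j').length :=
          Lf_succ_of_dup ws hs j' i hj' hin (by rw [he, hW])
        unfold capV
        rw [if_pos (by omega), hfull]
        exact List.take_of_length_le (by omega)
      have hdupP : ∀ j', j' < i - 1 → wA ws j' = P → capV ws (i + 1) j' = wA ws j' := by
        intro j' hj' he
        have hfull : Lf ws (j' + 1) = (wA ws j').length :=
          Lf_succ_of_dup ws hs j' (i - 1) hj' (by omega) (by rw [he, hP])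
        unfold capV
        rw [if_pos (by omega), hfull]
        exact List.take_of_length_le (by omega)
      have hPWdup : ∀ j', j' < i → wA ws j' = W → P = W := by
        intro j' hj' he
        have h2 : wA ws (i - 1) = wA ws j' :=
          wA_sandwich ws hs j' (i - 1) i (by omega) (by omega) hin (by rw [he, hW])
        rw [hP, h2]
        exact he
      have hjii : j < i ∨ j = i := by omega
      by_cases hb1 : l = 0
      · -- empty common prefix: insert W (W.take 1) only
        rw [if_pos hb1]
        rcases eq_or_ne (wA ws j) W with hjW | hjW
        · rcases hjii with hji | hji
          · exfalso
            have hPW := hPWdup j hji hjW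
            rw [hPW, lcp_self] at hl
            omega
          · subst hji
            rw [hjW, PySem.Dict.getD_insert_self, capV_top, ← hW, hLfi, hb1]
        · rw [PySem.Dict.getD_insert_of_ne _ _ _ hjW]
          have hji : j < i := by
            rcases hjii with h | h
            · exact h
            · exact absurd (by rw [h, ← hW]) hjW
          rw [ih (by omega) j hji]
          rcases Nat.lt_or_ge (j + 1) i with h | h
          · exact (capV_stable ws i j h).symm
          · have : j = i - 1 := by omega
            subst this
            rw [capV_snd ws i hi0, capV_prev ws i hi0, hLfi, hb1, Nat.max_zero]
      · rw [if_neg hb1]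
        by_cases hb2 : P.take l = P
        · -- insec == words[i-1] : a full-prefix previous word
          rw [if_pos hb2, hb2]
          have hlp : l = P.length := hinsec_eq_iff.mp hb2
          rcases eq_or_ne (wA ws j) W with hjW | hjW
          · rw [hjW, PySem.Dict.getD_insert_self]
            rcases hjii with hji | hji
            · have hPW := hPWdup j hji hjW
              rw [hdupW j hji hjW, hjW]
              rw [hPW] at hlp
              exact List.take_of_length_le (by omega)
            · subst hji
              rw [capV_top, ← hW, hLfi, Nat.add_comm 1 l]
          · rw [PySem.Dict.getD_insert_of_ne _ _ _ hjW]
            have hji : j < i := by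
              rcases hjii with h | h
              · exact h
              · exact absurd (by rw [h, ← hW]) hjW
            rcases eq_or_ne (wA ws j) P with hjP | hjP
            · rw [hjP, PySem.Dict.getD_insert_self]
              rcases Nat.lt_or_ge j (i - 1) with hji' | hji'
              · rw [hdupP j hji' hjP, hjP]
              · have : j = i - 1 := by omega
                subst this
                rw [capV_snd ws i hi0, ← hP, hLfi]
                exact (List.take_of_length_le (by omega)).symm
            · rw [PySem.Dict.getD_insert_of_ne _ _ _ hjP]
              have hji' : j < i - 1 := by
                rcases Nat.lt_or_ge j (i - 1) with h | h
                · exact h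
                · exact absurd (by rw [(by omega : j = i - 1), ← hP]) hjP
              rw [ih (by omega) j hji]
              exact (capV_stable ws i j (by omega)).symm
        · rw [if_neg hb2]
          have hlp : l < P.length := by
            rcases Nat.lt_or_ge l P.length with h | h
            · exact h
            · exact absurd (hinsec_eq_iff.mpr (by omega)) hb2
          have hPWne : P ≠ W := by
            intro h
            rw [h, lcp_self] at hl
            rw [h] at hlp
            omega
          rw [hd_prev, capV_prev ws i hi0, ← hP]
          rw [List.length_take]
          by_cases hb3 : min (1 + Lf ws (i - 1)) P.length ≤ l
          · rw [if_pos hb3]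
            have hLfprev : Lf ws (i - 1) < l := by omega
            rcases eq_or_ne (wA ws j) W with hjW | hjW
            · rcases hjii with hji | hji
              · exact absurd (hPWdup j hji hjW) hPWne
              · subst hji
                rw [hjW, PySem.Dict.getD_insert_self, capV_top, ← hW, hLfi, Nat.add_comm 1 l]
            · rw [PySem.Dict.getD_insert_of_ne _ _ _ hjW]
              have hji : j < i := by
                rcases hjii with h | h
                · exact h
                · exact absurd (by rw [h, ← hW]) hjW
              rcases eq_or_ne (wA ws j) P with hjP | hjP
              · rcases Nat.lt_or_ge j (i - 1) with hji' | hji'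
                · -- an earlier duplicate of P forces Lf (i-1) = |P|, contradicting Lf (i-1) < l < |P|
                  exfalso
                  have h2 : wA ws (i - 1 - 1) = wA ws j :=
                    wA_sandwich ws hs j (i - 1 - 1) (i - 1) (by omega) (by omega) (by omega)
                      (by rw [hjP, hP])
                  have hLfp : Lf ws (i - 1) = P.length := by
                    unfold Lf
                    rw [if_neg (by omega), h2, hjP, ← hP, lcp_self]
                  omega
                · have : j = i - 1 := by omega
                  subst this
                  rw [hjP, PySem.Dict.getD_insert_self, capV_snd ws i hi0, ← hP, hLfi]
                  congr 1
                  omega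
              · rw [PySem.Dict.getD_insert_of_ne _ _ _ hjP]
                have hji' : j < i - 1 := by
                  rcases Nat.lt_or_ge j (i - 1) with h | h
                  · exact h
                  · exact absurd (by rw [(by omega : j = i - 1), ← hP]) hjP
                rw [ih (by omega) j hji]
                exact (capV_stable ws i j (by omega)).symm
          · rw [if_neg hb3]
            have hLfprev : l ≤ Lf ws (i - 1) := by omega
            rcases eq_or_ne (wA ws j) W with hjW | hjW
            · rcases hjii with hji | hji
              · exact absurd (hPWdup j hji hjW) hPWne
              · subst hji
                rw [hjW, PySem.Dict.getD_insert_self, capV_top, ← hW, hLfi, Nat.add_comm 1 l]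
            · rw [PySem.Dict.getD_insert_of_ne _ _ _ hjW]
              have hji : j < i := by
                rcases hjii with h | h
                · exact h
                · exact absurd (by rw [h, ← hW]) hjW
              rw [ih (by omega) j hji]
              rcases Nat.lt_or_ge (j + 1) i with h | h
              · exact (capV_stable ws i j h).symm
              · have : j = i - 1 := by omega
                subst this
                rw [capV_snd ws i hi0, capV_prev ws i hi0, ← hP, hLfi]
                congr 2
                omega

-- PySem.List.sorted does not depend on which (propositionally equal) LT instance is used
lemma sorted_lt_irrel {α κ : Type} (i1 i2 : LT κ) (d1 : @DecidableLT κ i1) (d2 : @DecidableLT κ i2)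
    (h : ∀ a b : κ, @LT.lt κ i1 a b ↔ @LT.lt κ i2 a b) (xs : List α) (key : α → κ) :
    @PySem.List.sorted α κ i1 d1 xs key false = @PySem.List.sorted α κ i2 d2 xs key false := by
  rw [@PySem.List.sorted_eq_foldl_insertBy α κ i1 d1 xs key,
    @PySem.List.sorted_eq_foldl_insertBy α κ i2 d2 xs key]
  congr 1
  funext acc x
  congr 1
  funext a b
  exact decide_eq_decide.mpr (h (key a) (key b))

lemma sorted_toList_pairwise (words : List String) :
    ((PySem.List.sorted words (fun x => x.toList) false).map String.toList).Pairwise (· ≤ ·) := by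
  rw [List.pairwise_map,
    sorted_lt_irrel _ List.instLinearOrder.toLT _ LinearOrder.toDecidableLT
      (fun a b => Iff.rfl) words (fun x => x.toList)]
  exact PySem.List.sorted_pairwise words (fun x => x.toList)

lemma solution_eq (words : List String) (hpre : "" ∉ words) :
    solution words
      = sumTyped ((PySem.List.sorted words (fun x => x.toList) false).map String.toList) := by
  unfold solution
  set ws := (PySem.List.sorted words (fun x => x.toList) false).map String.toList with hws
  have hs : ws.Pairwise (· ≤ ·) := by
    rw [hws]
    exact sorted_toList_pairwise words
  have hne : ∀ w ∈ ws, w ≠ [] := by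
    intro w hw
    rw [hws] at hw
    obtain ⟨t, ht, rfl⟩ := List.mem_map.mp hw
    intro h
    have : t = "" := String.toList_eq_nil_iff.mp h
    subst this
    exact hpre ((PySem.List.mem_sorted _ _ _ _).mp ht)
  unfold sumTyped
  apply congrArg
  apply List.map_congr_left
  intro w hw
  obtain ⟨j, hj, hwj⟩ := List.mem_iff_getElem.mp hw
  have hwA : wA ws j = w := by
    rw [← hwj]
    exact List.getD_eq_getElem ws [] hj
  rw [← hwA, aInv ws hs hne ws.length le_rfl j hj]
  unfold capV typedSpec
  rw [List.length_take, maxlcp_neighbors ws hs j hj]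
  congr 1
  omega

-- ===== VERDICT (by name: the statement is the Claim_ definition above) =====
theorem solution_spec : Claim_equal_solution := by
  intro words _ hpre
  unfold Spec_solution
  rw [solution_eq words hpre, solution_alt_eq]
  exact sumTyped_perm _ _
    ((PySem.List.sorted_perm words (fun x => x.toList) false).map String.toList)
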